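-- pv_equiv track=rewrite | github.com/MNishii/RNN_for_Progression | functions.py | random_seq
-- ===== SOURCE A (Python) =====
-- def random_seq(x):
--     ans = 0
--     sign = []
--     for i in range(len(x)):
--         if i%2 == 0:
--             ans += x[i]
--         else:
--             ans -= x[i]
--         if ans >= 0:
--             sign.append(1)
--         else:
--             sign.append(0)
--     return ans, sign
-- ===== SOURCE B (Python) =====
-- def random_seq(x):
--     signed = [x[i] if i % 2 == 0 else -x[i] for i in range(len(x))]
--     prefix = []
--     total = 0
--     for v in signed:
--         total += v
--         prefix.append(total)
--     sign = [1 if p >= 0 else 0 for p in prefix]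
--     ans = prefix[-1] if prefix else 0
--     return ans, sign
-- ===== Notes on version B (the rewrite author's own statement) =====
-- stated objective: alternative
-- what changed: A's single fused loop (running sum with in-loop sign appends) is replaced by a three-phase pipeline: build the signed-term list, accumulate prefix sums into a materialized list, then map signs and take the last prefix as the answer.
import Mathlib
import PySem

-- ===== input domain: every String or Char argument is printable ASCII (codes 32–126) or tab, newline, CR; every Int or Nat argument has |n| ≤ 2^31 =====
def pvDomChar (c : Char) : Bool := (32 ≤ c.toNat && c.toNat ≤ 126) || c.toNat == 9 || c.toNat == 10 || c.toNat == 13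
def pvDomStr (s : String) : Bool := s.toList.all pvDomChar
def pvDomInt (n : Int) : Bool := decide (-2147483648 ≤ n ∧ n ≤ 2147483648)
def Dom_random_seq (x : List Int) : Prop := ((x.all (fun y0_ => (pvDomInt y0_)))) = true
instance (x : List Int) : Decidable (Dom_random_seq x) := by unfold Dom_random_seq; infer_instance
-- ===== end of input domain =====

-- B replaces A's single fused loop by a three-phase pipeline (signed terms, accumulated prefix list, sign map); same O(n) cost, alternative decomposition.


-- ===== PORT A =====
-- the loop over i in range(len(x)): state (ans, sign), i the current index, x[i] the head
def randomSeqGo : List Int → Nat → Int → List Int → Int × List Int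
  | [], _, ans, sign => (ans, sign)
  | v :: rest, i, ans, sign =>
    let ans' := if i % 2 == 0 then ans + v else ans - v
    randomSeqGo rest (i + 1) ans' (sign ++ [if ans' ≥ 0 then (1 : Int) else 0])

def random_seq (x : List Int) : Int × List Int := randomSeqGo x 0 0 []

-- ===== PORT B =====
-- phase 1: the signed-term list  [x[i] if i%2==0 else -x[i]]
def signedFrom : Nat → List Int → List Int
  | _, [] => []
  | i, v :: rest => (if i % 2 == 0 then v else -v) :: signedFrom (i + 1) rest

-- phase 2: running prefix sums (materialized list)
def accumFrom : Int → List Int → List Int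
  | _, [] => []
  | t, v :: rest => (t + v) :: accumFrom (t + v) rest

def random_seq_alt (x : List Int) : Int × List Int :=
  let signed := signedFrom 0 x
  let pfx := accumFrom 0 signed
  let sign := pfx.map (fun p => if p ≥ 0 then (1 : Int) else 0)
  (pfx.getLastD 0, sign)

-- ===== PRECONDITION & SPEC =====
def Spec_random_seq (x : List Int) (out : Int × List Int) : Prop := out = random_seq_alt x
instance (x : List Int) (out : Int × List Int) : Decidable (Spec_random_seq x out) := by unfold Spec_random_seq; infer_instance

-- ===== CLAIM (what is proved, stated in full; the proofs are below) =====
def Claim_equal_random_seq : Prop := ∀ (x : List Int), Dom_random_seq x → Spec_random_seq x (random_seq x)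

-- ===== LEMMAS AND PROOFS =====
theorem randomSeqGo_eq (x : List Int) : ∀ (i : Nat) (a : Int) (s : List Int),
    randomSeqGo x i a s =
      ((accumFrom a (signedFrom i x)).getLastD a,
       s ++ (accumFrom a (signedFrom i x)).map (fun p => if p ≥ 0 then (1 : Int) else 0)) := by
  induction x with
  | nil => intro i a s; simp [randomSeqGo, signedFrom, accumFrom]
  | cons v rest ih =>
    intro i a s
    simp only [randomSeqGo, signedFrom, accumFrom, List.map_cons, List.getLastD_cons]
    rw [ih]
    have ha : (if i % 2 == 0 then a + v else a - v)
        = a + (if i % 2 == 0 then v else -v) := by split <;> ring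
    rw [ha]
    simp

-- ===== VERDICT (by name: the statement is the Claim_ definition above) =====
theorem random_seq_spec : Claim_equal_random_seq := by
  intro x _
  unfold Spec_random_seq random_seq random_seq_alt
  rw [randomSeqGo_eq]
  simp
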